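-- pv_equiv track=rewrite | github.com/souravsrinivasgudla/raglens | backend/test_lines.py | find_line_number
-- ===== SOURCE A (Python) =====
-- def find_line_number(page_text: str, chunk_text: str) -> int:
--     """Find the starting line number of a chunk within a page."""
--     chunk_lines = [line.strip()
--                    for line in chunk_text.split("\n") if line.strip()]
--     if not chunk_lines:
--         return 1
--
--     first_chunk_line = chunk_lines[0]
--     search_phrase = first_chunk_line[:40].lower()  # type: ignore
--
--     lines = page_text.split("\n")
--     for i, line in enumerate(lines, start=1):
--         if search_phrase in line.lower():
--             return i
--
--     index = page_text.find(chunk_text[:100])  # type: ignore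
--     if index != -1:
--         return page_text.count("\n", 0, index) + 1
--
--     return 1
-- ===== SOURCE B (Python) =====
-- def find_line_number(page_text: str, chunk_text: str) -> int:
--     """Find the starting line number of a chunk within a page."""
--     chunk_lines = [line.strip()
--                    for line in chunk_text.split("\n") if line.strip()]
--     if not chunk_lines:
--         return 1
--
--     search_phrase = chunk_lines[0][:40].lower()
--
--     # One whole-text search instead of a line-by-line scan: the phrase
--     # contains no newline, so the first occurrence's line is the answer.
--     idx = page_text.lower().find(search_phrase)
--     if idx != -1:
--         return page_text.count("\n", 0, idx) + 1
--
--     index = page_text.find(chunk_text[:100])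
--     if index != -1:
--         return page_text.count("\n", 0, index) + 1
--
--     return 1
-- ===== Notes on version B (the rewrite author's own statement) =====
-- stated objective: idiomatic
-- what changed: Replaces the split-into-lines-and-scan loop (lowercasing and substring-testing each line) with a single lowercased whole-text find, converting the match offset to a line number by counting newlines before it.
import Mathlib
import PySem

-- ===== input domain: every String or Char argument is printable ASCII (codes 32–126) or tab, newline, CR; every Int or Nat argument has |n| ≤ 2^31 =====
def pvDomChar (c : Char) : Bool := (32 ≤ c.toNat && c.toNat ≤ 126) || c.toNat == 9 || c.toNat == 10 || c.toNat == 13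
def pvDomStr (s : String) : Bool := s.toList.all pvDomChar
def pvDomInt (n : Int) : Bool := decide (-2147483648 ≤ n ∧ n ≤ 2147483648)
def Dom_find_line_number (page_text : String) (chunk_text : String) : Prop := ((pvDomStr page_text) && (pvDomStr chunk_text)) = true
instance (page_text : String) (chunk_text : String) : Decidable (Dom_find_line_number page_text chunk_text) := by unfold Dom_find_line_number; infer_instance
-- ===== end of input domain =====

-- B replaces A's split-into-lines-and-scan loop by one lowercased whole-text find,
-- converting the match offset to a line number by counting the newlines before it (objective: idiomatic).

-- ===== PORT A =====
-- one element of the comprehension: strip the line, keep it if non-empty ("if line.strip()")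
def pvKeepLine (l : List Char) : Option (List Char) :=
  let s := PySem.Chars.strip l
  if s.isEmpty then none else some s

-- A's "for i, line in enumerate(lines, start=1): if search_phrase in line.lower(): return i"
def pvLoopA (phrase : List Char) : List (List Char) → Int → Option Int
  | [], _ => none
  | l :: ls, i => if PySem.Chars.isIn phrase (PySem.Chars.lower l) then some i else pvLoopA phrase ls (i+1)

def find_line_number (page_text : String) (chunk_text : String) : Int :=
  let chunk_lines := (PySem.Chars.splitOn chunk_text.toList ['\n']).filterMap pvKeepLine
  match chunk_lines with
  | [] => 1
  | first_chunk_line :: _ =>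
    let search_phrase := PySem.Chars.lower (PySem.List.slice first_chunk_line none (some 40))
    let lines := PySem.Chars.splitOn page_text.toList ['\n']
    match pvLoopA search_phrase lines 1 with
    | some i => i
    | none =>
      let index := PySem.Chars.find page_text.toList (PySem.List.slice chunk_text.toList none (some 100))
      if index ≠ -1 then
        (PySem.Chars.count (PySem.List.slice page_text.toList (some 0) (some index)) ['\n'] : Int) + 1
      else 1

-- ===== PORT B =====
def find_line_number_alt (page_text : String) (chunk_text : String) : Int :=
  let chunk_lines := (PySem.Chars.splitOn chunk_text.toList ['\n']).filterMap pvKeepLine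
  match chunk_lines with
  | [] => 1
  | first_chunk_line :: _ =>
    let search_phrase := PySem.Chars.lower (PySem.List.slice first_chunk_line none (some 40))
    let idx := PySem.Chars.find (PySem.Chars.lower page_text.toList) search_phrase
    if idx ≠ -1 then
      (PySem.Chars.count (PySem.List.slice page_text.toList (some 0) (some idx)) ['\n'] : Int) + 1
    else
      let index := PySem.Chars.find page_text.toList (PySem.List.slice chunk_text.toList none (some 100))
      if index ≠ -1 then
        (PySem.Chars.count (PySem.List.slice page_text.toList (some 0) (some index)) ['\n'] : Int) + 1
      else 1

-- ===== PRECONDITION & SPEC =====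
def Spec_find_line_number (page_text : String) (chunk_text : String) (out : Int) : Prop := out = find_line_number_alt page_text chunk_text
instance (page_text : String) (chunk_text : String) (out : Int) : Decidable (Spec_find_line_number page_text chunk_text out) := by unfold Spec_find_line_number; infer_instance

-- ===== CLAIM (what is proved, stated in full; the proofs are below) =====
def Claim_equal_find_line_number : Prop := ∀ (page_text : String) (chunk_text : String), Dom_find_line_number page_text chunk_text → Spec_find_line_number page_text chunk_text (find_line_number page_text chunk_text)

-- ===== LEMMAS AND PROOFS =====

theorem pv_lowerChar_newline_iff (c : Char) : PySem.Chars.lowerChar c = '\n' ↔ c = '\n' := by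
  constructor
  · intro h
    unfold PySem.Chars.lowerChar PySem.Chars.isupper at h
    split at h
    · next hu =>
      exfalso
      simp only [Bool.and_eq_true, decide_eq_true_eq, Char.le_def, UInt32.le_iff_toNat_le] at hu
      have h65 : 65 ≤ c.toNat := hu.1
      have h90 : c.toNat ≤ 90 := hu.2
      have hv : (c.toNat + 32).isValidChar := Or.inl (by omega)
      have ht : (Char.ofNat (c.toNat + 32)).toNat = c.toNat + 32 := by
        unfold Char.ofNat
        split
        · rfl
        · contradiction
      have := congrArg Char.toNat h
      rw [ht] at this
      have h10 : ('\n').toNat = 10 := rfl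
      rw [h10] at this
      omega
    · exact h
  · intro h; subst h; decide

theorem pv_mem_newline_lower (l : List Char) : '\n' ∈ PySem.Chars.lower l ↔ '\n' ∈ l := by
  unfold PySem.Chars.lower
  simp only [List.mem_map]
  constructor
  · rintro ⟨c, hc, h⟩; rw [pv_lowerChar_newline_iff] at h; exact h ▸ hc
  · intro h; exact ⟨'\n', h, by decide⟩

theorem pv_count_newline_lower (l : List Char) :
    (PySem.Chars.lower l).count '\n' = l.count '\n' := by
  unfold PySem.Chars.lower
  rw [List.count_eq_countP, List.count_eq_countP, List.countP_map]
  apply List.countP_congr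
  intro c _
  simp [Function.comp, pv_lowerChar_newline_iff c]

theorem pv_count_go_single (c : Char) (fuel : Nat) (l : List Char) (acc : Nat)
    (h : l.length ≤ fuel) : PySem.Chars.count.go [c] fuel l acc = acc + l.count c := by
  induction fuel generalizing l acc with
  | zero =>
    interval_cases hl : l.length
    rw [List.length_eq_zero_iff] at hl
    subst hl
    rw [PySem.Chars.count.go.eq_def]
    simp
  | succ fuel ih =>
    cases l with
    | nil => rw [PySem.Chars.count.go.eq_def]; simp
    | cons x t =>
      rw [PySem.Chars.count.go.eq_def]
      simp only [List.isPrefixOf_cons₂, List.isPrefixOf_nil_left, Bool.and_true]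
      by_cases hx : c = x
      · subst hx
        rw [if_pos (by simp)]
        have hd : List.drop [c].length (c :: t) = t := by simp
        rw [hd, ih t (acc+1) (by simp at h; omega)]
        simp [List.count_cons]
        omega
      · rw [if_neg (by simpa using hx)]
        rw [ih t acc (by simp at h; omega)]
        simp [Ne.symm hx]

theorem pv_count_single (c : Char) (l : List Char) :
    PySem.Chars.count l [c] = l.count c := by
  unfold PySem.Chars.count
  simp [pv_count_go_single c l.length l 0 le_rfl]

theorem pv_splitOn_go_acc (sep : List Char) (fuel : Nat) (l cur : List Char)
    (acc : List (List Char)) :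
    PySem.Chars.splitOn.go sep fuel l cur acc = acc.reverse ++ PySem.Chars.splitOn.go sep fuel l cur [] := by
  induction fuel generalizing l cur acc with
  | zero => rw [PySem.Chars.splitOn.go.eq_def, PySem.Chars.splitOn.go.eq_def]; simp
  | succ fuel ih =>
    cases l with
    | nil => rw [PySem.Chars.splitOn.go.eq_def, PySem.Chars.splitOn.go.eq_def]; simp
    | cons x t =>
      rw [PySem.Chars.splitOn.go.eq_def]
      conv_rhs => rw [PySem.Chars.splitOn.go.eq_def]
      simp only
      split
      · rw [ih _ _ (cur.reverse :: acc), ih _ _ [cur.reverse]]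
        simp
      · rw [ih _ _ acc]

theorem pv_splitOn_go_no_sep (c : Char) (fuel : Nat) (l cur : List Char)
    (acc : List (List Char)) (hl : c ∉ l) (hf : l.length ≤ fuel) :
    PySem.Chars.splitOn.go [c] fuel l cur acc = acc.reverse ++ [cur.reverse ++ l] := by
  induction fuel generalizing l cur acc with
  | zero =>
    interval_cases h : l.length
    rw [List.length_eq_zero_iff] at h; subst h
    rw [PySem.Chars.splitOn.go.eq_def]; simp
  | succ fuel ih =>
    cases l with
    | nil => rw [PySem.Chars.splitOn.go.eq_def]; simp
    | cons x t =>
      rw [PySem.Chars.splitOn.go.eq_def]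
      simp only [List.isPrefixOf_cons₂, List.isPrefixOf_nil_left, Bool.and_true]
      rw [if_neg (by simp; rintro rfl; exact hl (List.mem_cons_self))]
      rw [ih t (x :: cur) acc (fun h => hl (List.mem_cons_of_mem _ h)) (by simp at hf; omega)]
      simp

theorem pv_splitOn_go_sep (c : Char) (a : List Char) (fuel : Nat) (b cur : List Char)
    (acc : List (List Char)) (ha : c ∉ a) :
    PySem.Chars.splitOn.go [c] (a.length + 1 + fuel) (a ++ c :: b) cur acc
      = PySem.Chars.splitOn.go [c] fuel b [] ((cur.reverse ++ a) :: acc) := by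
  induction a generalizing cur with
  | nil =>
    rw [show (([] : List Char)).length + 1 + fuel = fuel + 1 from by simp [Nat.add_comm]]
    rw [PySem.Chars.splitOn.go.eq_def]
    simp only [List.nil_append]
    rw [if_pos (by simp)]
    simp
  | cons x a' ih =>
    rw [show (x :: a').length + 1 + fuel = (a'.length + 1 + fuel) + 1 from by simp; omega]
    rw [PySem.Chars.splitOn.go.eq_def]
    simp only [List.cons_append]
    rw [if_neg (by simp; rintro rfl; exact ha (List.mem_cons_self))]
    rw [ih (x :: cur) (fun h => ha (List.mem_cons_of_mem _ h))]
    simp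

theorem pv_splitOn_no_sep (c : Char) (s : List Char) (h : c ∉ s) :
    PySem.Chars.splitOn s [c] = [s] := by
  unfold PySem.Chars.splitOn
  rw [pv_splitOn_go_no_sep c _ s [] [] h (by omega)]
  simp

theorem pv_splitOn_cons (c : Char) (a b : List Char) (ha : c ∉ a) :
    PySem.Chars.splitOn (a ++ c :: b) [c] = a :: PySem.Chars.splitOn b [c] := by
  unfold PySem.Chars.splitOn
  have hlen : (a ++ c :: b).length + 1 = a.length + 1 + (b.length + 1) := by simp; omega
  rw [hlen, pv_splitOn_go_sep c a (b.length + 1) b [] [] ha]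
  rw [pv_splitOn_go_acc]
  simp

theorem pv_occ_split (c : Char) (phrase u v : List Char) (hc : c ∉ phrase)
    (j : Nat) (h : phrase <+: (u ++ c :: v).drop j) :
    (j + phrase.length ≤ u.length ∧ phrase <+: u.drop j) ∨
    (u.length < j ∧ phrase <+: v.drop (j - u.length - 1)) := by
  by_cases hj : j ≤ u.length
  · left
    rw [List.drop_append_of_le_length hj] at h
    by_cases hfit : phrase.length ≤ u.length - j
    · constructor
      · omega
      · have := List.prefix_iff_eq_take.mp h
        rw [List.take_append_of_le_length (by simp only [List.length_drop]; omega)] at this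
        exact this ▸ List.take_prefix _ _
    · exfalso
      apply hc
      have hlen : u.length - j < phrase.length := by omega
      have hidx : u.length - j < (u.drop j ++ c :: v).length := by
        simp only [List.length_append, List.length_drop, List.length_cons]; omega
      have h1 := List.IsPrefix.getElem h hlen
      have h2 : phrase[u.length - j]'hlen = c := by
        rw [h1]
        have hl : (List.drop j u).length = u.length - j := by simp
        exact List.getElem_of_append rfl hl
      exact h2 ▸ List.getElem_mem hlen
  · right
    refine ⟨by omega, ?_⟩
    rw [List.drop_append, List.drop_eq_nil_of_le (by omega : u.length ≤ j), List.nil_append,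
      show j - u.length = (j - u.length - 1) + 1 from by omega, List.drop_succ_cons] at h
    exact h

theorem pv_infix_split (c : Char) (phrase u v : List Char) (hc : c ∉ phrase) (hne : phrase ≠ []) :
    phrase <:+: (u ++ c :: v) ↔ phrase <:+: u ∨ phrase <:+: v := by
  constructor
  · intro h
    obtain ⟨j, hj⟩ := (PySem.Chars.exists_prefix_drop_iff_isIn phrase _).mpr
      ((PySem.Chars.isIn_iff_infix phrase _).mpr h)
    rcases pv_occ_split c phrase u v hc j hj with ⟨_, h'⟩ | ⟨_, h'⟩
    · exact Or.inl (List.infix_iff_prefix_suffix.mpr ⟨_, h', List.drop_suffix j u⟩)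
    · exact Or.inr (List.infix_iff_prefix_suffix.mpr ⟨_, h', List.drop_suffix _ v⟩)
  · rintro (h | h)
    · exact h.trans (List.prefix_append u (c :: v)).isInfix
    · exact h.trans ((List.suffix_cons c v).trans (List.suffix_append u (c :: v))).isInfix

theorem pv_find_fit (phrase u : List Char) (h : phrase <:+: u) (hne : phrase ≠ []) :
    (PySem.Chars.find u phrase).toNat + phrase.length ≤ u.length := by
  have hnn : 0 ≤ PySem.Chars.find u phrase := (PySem.Chars.find_nonneg_iff u phrase).mpr h
  have hsp := (PySem.Chars.find_spec hnn).1
  have hlen := hsp.length_le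
  simp only [List.length_drop] at hlen
  have hpos : 0 < phrase.length := List.length_pos_iff.mpr hne
  omega

theorem pv_find_left (c : Char) (phrase u v : List Char) (hc : c ∉ phrase) (hne : phrase ≠ [])
    (h : phrase <:+: u) :
    PySem.Chars.find (u ++ c :: v) phrase = PySem.Chars.find u phrase := by
  have hfit := pv_find_fit phrase u h hne
  have hnn : 0 ≤ PySem.Chars.find u phrase := (PySem.Chars.find_nonneg_iff u phrase).mpr h
  obtain ⟨hsp, hmin⟩ := PySem.Chars.find_spec hnn
  have hb : phrase <:+: (u ++ c :: v) := (pv_infix_split c phrase u v hc hne).mpr (Or.inl h)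
  have hnn' : 0 ≤ PySem.Chars.find (u ++ c :: v) phrase := (PySem.Chars.find_nonneg_iff _ phrase).mpr hb
  obtain ⟨hsp', hmin'⟩ := PySem.Chars.find_spec hnn'
  -- occurrence of phrase in the big string at the small find position
  have hocc : phrase <+: (u ++ c :: v).drop (PySem.Chars.find u phrase).toNat := by
    rw [List.drop_append_of_le_length (by omega)]
    exact hsp.trans (List.prefix_append _ _)
  have h1 : (PySem.Chars.find (u ++ c :: v) phrase).toNat ≤ (PySem.Chars.find u phrase).toNat := by
    by_contra hcon
    exact (hmin' _ (by omega)) hocc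
  rcases pv_occ_split c phrase u v hc _ hsp' with ⟨_, h'⟩ | ⟨hgt, _⟩
  · have h2 : ¬ (PySem.Chars.find (u ++ c :: v) phrase).toNat < (PySem.Chars.find u phrase).toNat :=
      fun hlt => (hmin _ hlt) h'
    omega
  · omega

theorem pv_find_right (c : Char) (phrase u v : List Char) (hc : c ∉ phrase) (hne : phrase ≠ [])
    (hu : ¬ phrase <:+: u) (hv : phrase <:+: v) :
    PySem.Chars.find (u ++ c :: v) phrase = u.length + 1 + PySem.Chars.find v phrase := by
  have hnn : 0 ≤ PySem.Chars.find v phrase := (PySem.Chars.find_nonneg_iff v phrase).mpr hv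
  obtain ⟨hsp, hmin⟩ := PySem.Chars.find_spec hnn
  have hb : phrase <:+: (u ++ c :: v) := (pv_infix_split c phrase u v hc hne).mpr (Or.inr hv)
  have hnn' : 0 ≤ PySem.Chars.find (u ++ c :: v) phrase := (PySem.Chars.find_nonneg_iff _ phrase).mpr hb
  obtain ⟨hsp', hmin'⟩ := PySem.Chars.find_spec hnn'
  have hocc : phrase <+: (u ++ c :: v).drop (u.length + 1 + (PySem.Chars.find v phrase).toNat) := by
    rw [List.drop_append, List.drop_eq_nil_of_le (by omega), List.nil_append,
      show u.length + 1 + (PySem.Chars.find v phrase).toNat - u.length = (PySem.Chars.find v phrase).toNat + 1 from by omega,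
      List.drop_succ_cons]
    exact hsp
  have h1 : (PySem.Chars.find (u ++ c :: v) phrase).toNat ≤ u.length + 1 + (PySem.Chars.find v phrase).toNat := by
    by_contra hcon
    exact (hmin' _ (by omega)) hocc
  rcases pv_occ_split c phrase u v hc _ hsp' with ⟨_, h'⟩ | ⟨hgt, h'⟩
  · exact absurd (List.infix_iff_prefix_suffix.mpr ⟨_, h', List.drop_suffix _ u⟩) hu
  · have h2 : ¬ ((PySem.Chars.find (u ++ c :: v) phrase).toNat - u.length - 1) < (PySem.Chars.find v phrase).toNat :=
      fun hlt => (hmin _ hlt) h'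
    omega

-- first-occurrence decomposition
theorem pv_first_occ (c : Char) (s : List Char) (h : c ∈ s) :
    ∃ a b, s = a ++ c :: b ∧ c ∉ a := by
  induction s with
  | nil => cases h
  | cons x t ih =>
    by_cases hx : x = c
    · exact ⟨[], t, by simp [hx], by simp⟩
    · have hct : c ∈ t := by
        rcases List.mem_cons.mp h with h' | h'
        · exact absurd h'.symm hx
        · exact h'
      obtain ⟨a, b, rfl, ha⟩ := ih hct
      exact ⟨x :: a, b, by simp, by simp [ha]; exact fun h' => hx h'.symm⟩

theorem pv_splitOn_pieces (c : Char) (s : List Char) :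
    ∀ l ∈ PySem.Chars.splitOn s [c], c ∉ l := by
  induction hn : s.length using Nat.strong_induction_on generalizing s with
  | _ n ih =>
    by_cases h : c ∈ s
    · obtain ⟨a, b, rfl, ha⟩ := pv_first_occ c s h
      rw [pv_splitOn_cons c a b ha]
      intro l hl
      rcases List.mem_cons.mp hl with rfl | hl'
      · exact ha
      · exact ih b.length (by simp at hn; omega) b rfl l hl'
    · rw [pv_splitOn_no_sep c s h]
      intro l hl
      rcases List.mem_cons.mp hl with rfl | hl'
      · exact h
      · cases hl'

theorem pv_count_take_nomem (c : Char) (l : List Char) (n : Nat) (h : c ∉ l) :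
    (l.take n).count c = 0 := by
  rw [List.count_eq_zero]
  exact fun hm => h (List.mem_of_mem_take hm)

theorem pv_loop_eq (phrase : List Char) (h1 : phrase ≠ []) (h2 : '\n' ∉ phrase)
    (p : List Char) (k : Int) :
    pvLoopA phrase (PySem.Chars.splitOn p ['\n']) k =
      (if PySem.Chars.find (PySem.Chars.lower p) phrase = -1 then none
       else some (k + ((((PySem.Chars.lower p).take (PySem.Chars.find (PySem.Chars.lower p) phrase).toNat).count '\n' : Nat) : Int))) := by
  induction hn : p.length using Nat.strong_induction_on generalizing p k with
  | _ n ih =>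
  by_cases hp : '\n' ∈ p
  · obtain ⟨a, b, rfl, ha⟩ := pv_first_occ '\n' p hp
    have hla : '\n' ∉ PySem.Chars.lower a := fun h => ha ((pv_mem_newline_lower a).mp h)
    have hlow : PySem.Chars.lower (a ++ '\n' :: b) = PySem.Chars.lower a ++ '\n' :: PySem.Chars.lower b := by
      unfold PySem.Chars.lower
      simp [show PySem.Chars.lowerChar '\n' = '\n' from by decide]
    rw [pv_splitOn_cons '\n' a b ha, hlow]
    simp only [pvLoopA]
    by_cases hia : PySem.Chars.isIn phrase (PySem.Chars.lower a)
    · rw [if_pos hia]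
      have hinf : phrase <:+: PySem.Chars.lower a := (PySem.Chars.isIn_iff_infix _ _).mp hia
      rw [pv_find_left '\n' phrase _ _ h2 h1 hinf]
      have hnn : 0 ≤ PySem.Chars.find (PySem.Chars.lower a) phrase := (PySem.Chars.find_nonneg_iff _ _).mpr hinf
      rw [if_neg (by omega)]
      have hfit := pv_find_fit phrase (PySem.Chars.lower a) hinf h1
      rw [List.take_append_of_le_length (by omega)]
      rw [pv_count_take_nomem _ _ _ hla]
      simp
    · rw [if_neg hia]
      have hninf : ¬ phrase <:+: PySem.Chars.lower a := fun h => hia ((PySem.Chars.isIn_iff_infix _ _).mpr h)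
      by_cases hib : phrase <:+: PySem.Chars.lower b
      · rw [pv_find_right '\n' phrase _ _ h2 h1 hninf hib]
        have hnn : 0 ≤ PySem.Chars.find (PySem.Chars.lower b) phrase := (PySem.Chars.find_nonneg_iff _ _).mpr hib
        rw [if_neg (by omega)]
        rw [ih b.length (by simp at hn; omega) b (k+1) rfl]
        rw [if_neg (by omega)]
        have hlen : (PySem.Chars.lower a).length = a.length := by unfold PySem.Chars.lower; simp
        have htn : ((PySem.Chars.lower a).length + 1 + PySem.Chars.find (PySem.Chars.lower b) phrase).toNat
            = (PySem.Chars.lower a).length + (1 + (PySem.Chars.find (PySem.Chars.lower b) phrase).toNat) := by omega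
        rw [htn, List.take_length_add_append]
        rw [show (1 + (PySem.Chars.find (PySem.Chars.lower b) phrase).toNat) = (PySem.Chars.find (PySem.Chars.lower b) phrase).toNat + 1 from by omega]
        simp only [List.take_succ_cons]
        rw [List.count_append, List.count_cons, List.count_eq_zero.mpr hla]
        simp
        ring
      · have hnb : PySem.Chars.find (PySem.Chars.lower b) phrase = -1 := (PySem.Chars.find_eq_neg_one_iff _ _).mpr hib
        have hbig : PySem.Chars.find (PySem.Chars.lower a ++ '\n' :: PySem.Chars.lower b) phrase = -1 := by
          rw [PySem.Chars.find_eq_neg_one_iff]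
          rw [pv_infix_split '\n' phrase _ _ h2 h1]
          tauto
        rw [hbig, if_pos rfl]
        rw [ih b.length (by simp at hn; omega) b (k+1) rfl, hnb]
        simp
  · rw [pv_splitOn_no_sep '\n' p hp]
    have hlp : '\n' ∉ PySem.Chars.lower p := fun h => hp ((pv_mem_newline_lower p).mp h)
    simp only [pvLoopA]
    by_cases hi : PySem.Chars.isIn phrase (PySem.Chars.lower p)
    · rw [if_pos hi]
      have hinf := (PySem.Chars.isIn_iff_infix _ _).mp hi
      have hnn : 0 ≤ PySem.Chars.find (PySem.Chars.lower p) phrase := (PySem.Chars.find_nonneg_iff _ _).mpr hinf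
      rw [if_neg (by omega), pv_count_take_nomem _ _ _ hlp]
      simp
    · rw [if_neg hi]
      have hninf : ¬ phrase <:+: PySem.Chars.lower p := fun h => hi ((PySem.Chars.isIn_iff_infix _ _).mpr h)
      rw [if_pos ((PySem.Chars.find_eq_neg_one_iff _ _).mpr hninf)]

-- slice xs[0:b] for 0 <= b is take
theorem pv_slice_zero {α : Type} (xs : List α) (b : Int) (hb : 0 ≤ b) :
    PySem.List.slice xs (some 0) (some b) = List.take b.toNat xs := by
  have := PySem.List.slice_to xs hb
  unfold PySem.List.slice PySem.List.clampIdx at this ⊢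
  simpa using this

theorem pv_strip_subset (x : Char) (l : List Char) (h : x ∈ PySem.Chars.strip l) : x ∈ l := by
  unfold PySem.Chars.strip PySem.Chars.rstrip PySem.Chars.lstrip at h
  rw [List.mem_reverse] at h
  have h1 := (List.dropWhile_sublist _).subset h
  rw [List.mem_reverse] at h1
  exact (List.dropWhile_sublist _).subset h1

-- ===== VERDICT (by name: the statement is the Claim_ definition above) =====
theorem find_line_number_spec : Claim_equal_find_line_number := by
  unfold Claim_equal_find_line_number
  intro page chunk _
  unfold Spec_find_line_number find_line_number find_line_number_alt
  cases hc : (PySem.Chars.splitOn chunk.toList ['\n']).filterMap pvKeepLine with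
  | nil => simp
  | cons first rest =>
    simp only
    have hfirst : first ∈ List.filterMap pvKeepLine (PySem.Chars.splitOn chunk.toList ['\n']) := by
      rw [hc]; exact List.mem_cons_self
    obtain ⟨l0, hl0, hk⟩ := List.mem_filterMap.mp hfirst
    simp only [pvKeepLine] at hk
    split_ifs at hk with he
    rw [Option.some_inj] at hk
    have hfe : first ≠ [] := by
      rw [hk] at he
      simpa [List.isEmpty_iff] using he
    have hnl0 : '\n' ∉ l0 := pv_splitOn_pieces '\n' chunk.toList l0 hl0
    have hnf : '\n' ∉ first := fun h => hnl0 (pv_strip_subset _ _ (hk ▸ h : _ ∈ PySem.Chars.strip l0))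
    have hslice : PySem.List.slice first none (some 40) = first.take 40 := by
      have h40 : ((40:Int)).toNat = 40 := rfl
      rw [PySem.List.slice_to first (by norm_num : (0:Int) ≤ 40), h40]
    have hph1 : PySem.Chars.lower (PySem.List.slice first none (some 40)) ≠ [] := by
      rw [hslice]
      unfold PySem.Chars.lower
      simp only [ne_eq, List.map_eq_nil_iff, List.take_eq_nil_iff]
      push_neg
      exact ⟨by norm_num, hfe⟩
    have hph2 : '\n' ∉ PySem.Chars.lower (PySem.List.slice first none (some 40)) := by
      rw [hslice]
      intro h
      exact hnf (List.mem_of_mem_take ((pv_mem_newline_lower _).mp h))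
    rw [pv_loop_eq _ hph1 hph2]
    by_cases hf : PySem.Chars.find (PySem.Chars.lower page.toList)
        (PySem.Chars.lower (PySem.List.slice first none (some 40))) = -1
    · rw [if_pos hf]
      simp [hf]
    · rw [if_neg hf]
      simp only [ne_eq, hf, not_false_iff, if_pos]
      have hge : 0 ≤ PySem.Chars.find (PySem.Chars.lower page.toList)
          (PySem.Chars.lower (PySem.List.slice first none (some 40))) := by
        have := PySem.Chars.neg_one_le_find (PySem.Chars.lower page.toList)
          (PySem.Chars.lower (PySem.List.slice first none (some 40)))
        omega
      rw [pv_slice_zero page.toList _ hge, pv_count_single]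
      have hmap : (PySem.Chars.lower page.toList).take (PySem.Chars.find (PySem.Chars.lower page.toList)
          (PySem.Chars.lower (PySem.List.slice first none (some 40)))).toNat
          = PySem.Chars.lower (page.toList.take (PySem.Chars.find (PySem.Chars.lower page.toList)
          (PySem.Chars.lower (PySem.List.slice first none (some 40)))).toNat) := by
        unfold PySem.Chars.lower
        exact (List.map_take).symm
      rw [hmap, pv_count_newline_lower]
      omega
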